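-- pv_equiv track=rewrite | github.com/pypi-data/pypi-mirror-373 | packages/oplnk-python-utils/oplnk_python_utils-1.1.9-py3-none-any.whl/oplnk_python_utils/core/parsing.py | validate_field_path
-- ===== SOURCE A (Python) =====
-- def validate_field_path(field: str) -> bool:
--     """
--     Validate if a field path is valid for MongoDB aggregation.
--
--     Args:
--         field: Field path to validate
--
--     Returns:
--         bool: True if valid, False otherwise
--     """
--     if not field or not isinstance(field, str):
--         return False
--
--     # Check for invalid characters
--     invalid_chars = ["$", " ", "\t", "\n", "\r"]
--     if any(
--         char in field
--         for char in invalid_chars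
--         if char != "$" or not field.startswith("$")
--     ):
--         return False
--
--     return True
-- ===== SOURCE B (Python) =====
-- def validate_field_path(field: str) -> bool:
--     """Single pass: reject whitespace anywhere and '$' unless the path leads with '$'."""
--     if not field or not isinstance(field, str):
--         return False
--     leads = field.startswith("$")
--     for ch in field:
--         if ch in {" ", "\t", "\n", "\r"}:
--             return False
--         if ch == "$" and not leads:
--             return False
--     return True
-- ===== Notes on version B (the rewrite author's own statement) =====
-- stated objective: simpler
-- what changed: B replaces A's outer loop over the five invalid characters (each doing a full substring scan of field) with one pass over field's characters testing each against a small set, computing the leading-'$' flag once.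
import Mathlib
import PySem

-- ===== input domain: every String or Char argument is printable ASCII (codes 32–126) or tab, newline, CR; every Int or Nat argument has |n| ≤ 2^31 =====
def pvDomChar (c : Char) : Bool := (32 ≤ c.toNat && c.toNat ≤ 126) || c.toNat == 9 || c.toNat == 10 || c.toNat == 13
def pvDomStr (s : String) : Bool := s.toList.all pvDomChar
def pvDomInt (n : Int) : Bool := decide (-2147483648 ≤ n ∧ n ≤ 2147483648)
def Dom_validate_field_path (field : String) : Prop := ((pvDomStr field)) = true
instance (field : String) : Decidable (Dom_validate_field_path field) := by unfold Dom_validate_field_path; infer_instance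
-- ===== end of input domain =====

-- B replaces A's loop over the five invalid characters (each a full substring scan)
-- with a single pass over the field's characters; objective: simpler.

-- ===== PORT A =====
def validate_field_path (field : String) : Bool :=
  -- `if not field` (isinstance is always true under the type convention)
  if field.toList.isEmpty then false
  else
    -- invalid_chars = ["$", " ", "\t", "\n", "\r"]; the generator's `if` filter, then `any(char in field …)`
    let invalid_chars : List String := ["$", " ", "\t", "\n", "\r"]
    if (invalid_chars.filter
          (fun ch => ch != "$" || !(PySem.Str.startswith field "$"))).any
        (fun ch => PySem.Str.isIn ch field) then false
    else true

-- ===== PORT B =====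
def pvBLoop (leads : Bool) : List Char → Bool
  | [] => true
  | c :: cs =>
      if c == ' ' || c == '\t' || c == '\n' || c == '\r' then false
      else if c == '$' && !leads then false
      else pvBLoop leads cs

def validate_field_path_alt (field : String) : Bool :=
  if field.toList.isEmpty then false
  else pvBLoop (PySem.Str.startswith field "$") field.toList

-- ===== PRECONDITION & SPEC =====
def Spec_validate_field_path (field : String) (out : Bool) : Prop := out = validate_field_path_alt field
instance (field : String) (out : Bool) : Decidable (Spec_validate_field_path field out) := by unfold Spec_validate_field_path; infer_instance

-- ===== CLAIM (what is proved, stated in full; the proofs are below) =====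
def Claim_equal_validate_field_path : Prop := ∀ (field : String), Dom_validate_field_path field → Spec_validate_field_path field (validate_field_path field)

-- ===== LEMMAS AND PROOFS =====

theorem singleton_infix_iff_mem (c : Char) (l : List Char) : [c] <:+: l ↔ c ∈ l := by
  constructor
  · intro h; exact h.subset (List.mem_singleton_self c)
  · intro h
    obtain ⟨s, t, rfl⟩ := List.append_of_mem h
    exact ⟨s, t, by simp⟩

theorem isIn_single (c : Char) (l : List Char) :
    PySem.Chars.isIn [c] l = l.contains c := by
  rcases h : l.contains c with _ | _
  · rw [PySem.Chars.isIn_eq_false_iff, singleton_infix_iff_mem]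
    simp_all
  · rw [(PySem.Chars.isIn_iff_infix [c] l).2
      ((singleton_infix_iff_mem c l).2 (by simp_all))]

theorem pvBLoop_eq (leads : Bool) (l : List Char) :
    pvBLoop leads l =
      !(l.contains ' ' || l.contains '\t' || l.contains '\n' || l.contains '\r'
        || (!leads && l.contains '$')) := by
  induction l with
  | nil => simp [pvBLoop]
  | cons c cs ih =>
      by_cases h1 : c = ' ' ∨ c = '\t' ∨ c = '\n' ∨ c = '\r'
      · rcases h1 with h | h | h | h <;> subst h <;> simp [pvBLoop]
      · push Not at h1
        obtain ⟨h1, h2, h3, h4⟩ := h1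
        by_cases h5 : c = '$'
        · subst h5
          cases leads <;> simp [pvBLoop, ih, Ne.symm h1, Ne.symm h2, Ne.symm h3, Ne.symm h4,
            Bool.and_left_comm, Bool.and_comm]
        · simp [pvBLoop, ih, h1, h2, h3, h4, h5, Ne.symm h1, Ne.symm h2, Ne.symm h3, Ne.symm h4, Ne.symm h5,
            Bool.and_assoc, Bool.and_left_comm, Bool.and_comm]

-- ===== VERDICT (by name: the statement is the Claim_ definition above) =====
theorem validate_field_path_spec : Claim_equal_validate_field_path := by
  intro field _
  unfold Spec_validate_field_path validate_field_path validate_field_path_alt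
  rcases he : field.toList.isEmpty with _ | _
  · simp only [Bool.false_eq_true, if_false]
    rcases hs : PySem.Str.startswith field "$" with _ | _ <;>
      simp [List.filter, List.any, isIn_single, pvBLoop_eq,
        Bool.and_assoc, Bool.and_left_comm, Bool.and_comm]
  · simp
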